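-- pv_equiv track=rewrite | github.com/BalazsFarkas25/FitMySize | Application/app/helpers/evaluation.py | find_body_height
-- ===== SOURCE A (Python) =====
-- def find_body_height(array):
--     first_index = None
--     last_index = None
--
--     # Find the first occurrence of the value
--     for i, element in enumerate(array):
--         if element != -1:
--             first_index = i
--             break
--
--     # Find the last occurrence of the value
--     for i in range(len(array) - 1, -1, -1):
--         if array[i] != -1:
--             last_index = i
--             break
--
--     return last_index-first_index
-- ===== SOURCE B (Python) =====
-- def find_body_height(array):
--     # One pass, no indices: count the leading run of -1s (lead) and the
--     # current trailing run of -1s (run); the answer is the length of the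
--     # array after trimming both runs, minus one.
--     seen = False
--     lead = 0
--     run = 0
--     for e in array:
--         if e == -1:
--             if not seen:
--                 lead += 1
--             run += 1
--         else:
--             seen = True
--             run = 0
--     return len(array) - lead - run - 1
-- ===== Notes on version B (the rewrite author's own statement) =====
-- stated objective: alternative
-- what changed: Replaces A's two index-based scans with early breaks by a single index-free counting pass (length of leading and trailing -1 runs) and the closed form len(array) - lead - run - 1.
import Mathlib
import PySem

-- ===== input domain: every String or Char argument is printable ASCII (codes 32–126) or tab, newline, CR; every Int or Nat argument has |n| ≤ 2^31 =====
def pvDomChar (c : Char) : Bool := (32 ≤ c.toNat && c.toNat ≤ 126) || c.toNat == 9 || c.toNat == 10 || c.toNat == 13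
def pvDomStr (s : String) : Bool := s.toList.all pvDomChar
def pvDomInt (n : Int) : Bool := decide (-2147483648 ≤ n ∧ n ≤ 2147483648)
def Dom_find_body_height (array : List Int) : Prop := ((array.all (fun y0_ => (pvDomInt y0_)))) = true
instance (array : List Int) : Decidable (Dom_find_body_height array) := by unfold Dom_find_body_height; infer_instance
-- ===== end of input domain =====

-- B replaces A's two index scans with breaks by one index-free counting pass
-- (leading/trailing -1 run lengths) and the closed form len - lead - run - 1;
-- Pre_ excludes all-(-1)/empty arrays, where A raises TypeError.

-- ===== PORT A =====
-- first loop of A: first index (from i) whose element is ≠ -1, with break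
def fbhFirstAux : List Int → Int → Option Int
  | [], _ => none
  | e :: rest, i => if e ≠ -1 then some i else fbhFirstAux rest (i + 1)

-- second loop of A: descending index scan with break, checking later indices first
def fbhLastAux : List Int → Int → Option Int
  | [], _ => none
  | e :: rest, i =>
    match fbhLastAux rest (i + 1) with
    | some j => some j
    | none => if e ≠ -1 then some i else none

def find_body_height (array : List Int) : Int :=
  let first_index := fbhFirstAux array 0
  let last_index := fbhLastAux array 0
  match last_index, first_index with
  | some l, some f => l - f
  | _, _ => 0   -- unreachable under Pre_ (Python raises TypeError here)

-- ===== PORT B =====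
-- one loop iteration of Source B: state (seen, lead, run)
def fbhStep (s : Bool × Int × Int) (e : Int) : Bool × Int × Int :=
  if e == -1 then
    (s.1, if !s.1 then s.2.1 + 1 else s.2.1, s.2.2 + 1)
  else
    (true, s.2.1, 0)

def find_body_height_alt (array : List Int) : Int :=
  let s := array.foldl fbhStep (false, 0, 0)
  (array.length : Int) - s.2.1 - s.2.2 - 1

-- ===== PRECONDITION & SPEC =====
-- Pre_ excludes exactly the inputs where A raises TypeError (no element ≠ -1, incl. empty list)
def Pre_find_body_height (array : List Int) : Prop := ∃ e ∈ array, e ≠ -1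
instance (array : List Int) : Decidable (Pre_find_body_height array) := by unfold Pre_find_body_height; infer_instance
def pvWitness_find_body_height : List Int := [-1, 170, -1, 180, -1]
def Spec_find_body_height (array : List Int) (out : Int) : Prop := out = find_body_height_alt array
instance (array : List Int) (out : Int) : Decidable (Spec_find_body_height array out) := by unfold Spec_find_body_height; infer_instance

-- ===== CLAIM (what is proved, stated in full; the proofs are below) =====
def Claim_equal_find_body_height : Prop := ∀ (array : List Int), Dom_find_body_height array → Pre_find_body_height array → Spec_find_body_height array (find_body_height array)



-- ===== LEMMAS AND PROOFS =====
-- length of the leading run of -1s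
def fbhLead (l : List Int) : Nat := (l.takeWhile (fun e => e == -1)).length
-- length of the trailing run of -1s
def fbhRun (l : List Int) : Nat := (l.reverse.takeWhile (fun e => e == -1)).length

theorem fbh_tw_append (r : List Int) (a : Int) :
    (List.takeWhile (fun e => e == -1) (r ++ [a])).length =
      if r.any (fun x => !(x == -1)) then (List.takeWhile (fun e => e == -1) r).length
      else (if a == -1 then r.length + 1 else r.length) := by
  induction r with
  | nil => cases h : (a == -1) <;> simp [List.takeWhile, h]
  | cons b r ih =>
    cases hb : (b == -1) with
    | true =>
      simp only [List.cons_append, List.takeWhile, hb, List.any_cons, Bool.not_true,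
        Bool.false_or, List.length_cons]
      rw [ih]
      split_ifs <;> omega
    | false => simp [List.takeWhile, hb]

theorem fbhRun_cons (a : Int) (l : List Int) :
    fbhRun (a :: l) =
      if l.any (fun x => !(x == -1)) then fbhRun l
      else (if a == -1 then l.length + 1 else l.length) := by
  unfold fbhRun
  rw [List.reverse_cons, fbh_tw_append]
  simp [List.any_reverse, List.length_reverse]

-- invariant of B's loop: the fold computes (seen any non -1, lead, run)
theorem fbh_fold (l : List Int) (seen : Bool) (lead run : Int) :
    l.foldl fbhStep (seen, lead, run) =
      (seen || l.any (fun x => !(x == -1)),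
       if seen then lead else lead + (fbhLead l : Int),
       if l.any (fun x => !(x == -1)) then (fbhRun l : Int) else run + (l.length : Int)) := by
  induction l generalizing seen lead run with
  | nil => cases seen <;> simp [fbhLead]
  | cons a l ih =>
    cases ha : (a == -1) with
    | true =>
      have hstep : fbhStep (seen, lead, run) a = (seen, if !seen then lead + 1 else lead, run + 1) := by
        simp [fbhStep, ha]
      have hlead : fbhLead (a :: l) = fbhLead l + 1 := by
        simp [fbhLead, List.takeWhile, ha]
      have hrun := fbhRun_cons a l
      rw [ha] at hrun
      rw [List.foldl_cons, hstep, ih]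
      cases seen <;> by_cases hany : l.any (fun x => !(x == -1)) = true <;>
          simp [ha, hlead, hrun, hany] <;> omega
    | false =>
      have hstep : fbhStep (seen, lead, run) a = (true, lead, 0) := by
        simp [fbhStep, ha]
      have hlead : fbhLead (a :: l) = 0 := by
        simp [fbhLead, List.takeWhile, ha]
      have hrun := fbhRun_cons a l
      rw [ha] at hrun
      rw [List.foldl_cons, hstep, ih]
      cases seen <;> by_cases hany : l.any (fun x => !(x == -1)) = true <;>
          simp [ha, hlead, hrun, hany]

theorem fbhFirst_some (l : List Int) (i : Int) (h : ∃ e ∈ l, e ≠ -1) :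
    fbhFirstAux l i = some (i + (fbhLead l : Int)) := by
  induction l generalizing i with
  | nil => simp at h
  | cons a l ih =>
    cases ha : (a == -1) with
    | false =>
      have ha' : a ≠ -1 := by simpa using ha
      have hlead : fbhLead (a :: l) = 0 := by simp [fbhLead, List.takeWhile, ha]
      simp [fbhFirstAux, ha', hlead]
    | true =>
      have ha' : a = -1 := by simpa using ha
      have h' : ∃ e ∈ l, e ≠ -1 := by
        obtain ⟨x, hx, hne⟩ := h
        rcases List.mem_cons.mp hx with rfl | hx
        · exact absurd ha' hne
        · exact ⟨x, hx, hne⟩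
      have hlead : fbhLead (a :: l) = fbhLead l + 1 := by
        simp [fbhLead, List.takeWhile, ha]
      rw [show fbhFirstAux (a :: l) i = fbhFirstAux l (i + 1) by simp [fbhFirstAux, ha'],
        ih (i + 1) h', hlead]
      congr 1
      push_cast
      ring

theorem fbhLast_none (l : List Int) (i : Int) (h : ∀ e ∈ l, e = -1) :
    fbhLastAux l i = none := by
  induction l generalizing i with
  | nil => rfl
  | cons a l ih =>
    have ha : a = -1 := h a List.mem_cons_self
    have hrest : ∀ e ∈ l, e = -1 := fun e he => h e (List.mem_cons_of_mem _ he)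
    simp [fbhLastAux, ih (i + 1) hrest, ha]

theorem fbhLast_some (l : List Int) (i : Int) (h : ∃ e ∈ l, e ≠ -1) :
    fbhLastAux l i = some (i + (l.length : Int) - 1 - (fbhRun l : Int)) := by
  induction l generalizing i with
  | nil => simp at h
  | cons a l ih =>
    by_cases hl : ∃ e ∈ l, e ≠ -1
    · have hanyl : l.any (fun x => !(x == -1)) = true := by
        rw [List.any_eq_true]
        obtain ⟨x, hx, hne⟩ := hl
        exact ⟨x, hx, by simpa using hne⟩
      have hrun : fbhRun (a :: l) = fbhRun l := by
        rw [fbhRun_cons]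
        simp [hanyl]
      simp only [fbhLastAux, ih (i + 1) hl]
      rw [hrun]
      congr 1
      simp only [List.length_cons]
      push_cast
      ring
    · have hall : ∀ e ∈ l, e = -1 := fun e he => by
        by_contra hne
        exact hl ⟨e, he, hne⟩
      have ha : a ≠ -1 := by
        obtain ⟨x, hx, hne⟩ := h
        rcases List.mem_cons.mp hx with rfl | hx
        · exact hne
        · exact absurd (hall x hx) hne
      have hanyl : l.any (fun x => !(x == -1)) = false := by
        rw [List.any_eq_false]
        intro x hx
        simp [hall x hx]
      have hrun : fbhRun (a :: l) = l.length := by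
        rw [fbhRun_cons]
        simp [hanyl, show (a == -1) = false by simp [ha]]
      simp only [fbhLastAux, fbhLast_none l (i + 1) hall, ha, ne_eq, not_false_eq_true, if_true]
      rw [hrun]
      congr 1
      simp only [List.length_cons]
      push_cast
      ring

-- ===== VERDICT (by name: the statement is the Claim_ definition above) =====
theorem find_body_height_spec : Claim_equal_find_body_height := by
  intro array _ hpre
  unfold Spec_find_body_height find_body_height find_body_height_alt
  have hany : array.any (fun x => !(x == -1)) = true := by
    rw [List.any_eq_true]
    obtain ⟨e, he, hne⟩ := hpre
    exact ⟨e, he, by simpa using hne⟩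
  rw [fbhFirst_some array 0 hpre, fbhLast_some array 0 hpre, fbh_fold, hany]
  simp only [if_false, Bool.false_eq_true, if_true]
  ring
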